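-- pv_equiv track=rewrite | github.com/MatiRomero/ddp_pkg_release | src/ddp/scripts/plot_results.py | _shadow_family
-- ===== SOURCE A (Python) =====
-- _SHADOW_COLOR_FAMILIES: dict[str, tuple[str, ...]] = {
--     # Keep policy colours stable across plots for recognisable comparisons.
--     "opt": ("#111111",),
--     "naive": ("#f59e0b",),
--     "pb": ("#2563eb",),
--     "hd": ("#16a34a",),
--     "ad": ("#d946ef",),
-- }
--
-- def _shadow_family(shadow: str) -> str | None:
--     lowered = shadow.lower()
--     for family in _SHADOW_COLOR_FAMILIES:
--         if lowered == family:
--             return family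
--         if lowered.startswith(f"{family}+"):
--             return family
--         if lowered.startswith(f"{family}-"):
--             return family
--         if lowered.startswith(f"{family}_"):
--             return family
--     return None
-- ===== SOURCE B (Python) =====
-- _SHADOW_COLOR_FAMILIES: dict[str, tuple[str, ...]] = {
--     "opt": ("#111111",),
--     "naive": ("#f59e0b",),
--     "pb": ("#2563eb",),
--     "hd": ("#16a34a",),
--     "ad": ("#d946ef",),
-- }
--
--
-- def _shadow_family(shadow: str) -> str | None:
--     # Take the prefix up to the first separator ('+', '-' or '_'),
--     # then do a single dictionary lookup instead of a per-family scan.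
--     lowered = shadow.lower()
--     cut = len(lowered)
--     for i, ch in enumerate(lowered):
--         if ch in "+-_":
--             cut = i
--             break
--     candidate = lowered[:cut]
--     return candidate if candidate in _SHADOW_COLOR_FAMILIES else None
-- ===== Notes on version B (the rewrite author's own statement) =====
-- stated objective: simpler
-- what changed: Replaced the per-family loop with its three startswith checks by a single prefix extraction up to the first separator ('+','-','_') followed by one dictionary-key lookup.
import Mathlib
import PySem

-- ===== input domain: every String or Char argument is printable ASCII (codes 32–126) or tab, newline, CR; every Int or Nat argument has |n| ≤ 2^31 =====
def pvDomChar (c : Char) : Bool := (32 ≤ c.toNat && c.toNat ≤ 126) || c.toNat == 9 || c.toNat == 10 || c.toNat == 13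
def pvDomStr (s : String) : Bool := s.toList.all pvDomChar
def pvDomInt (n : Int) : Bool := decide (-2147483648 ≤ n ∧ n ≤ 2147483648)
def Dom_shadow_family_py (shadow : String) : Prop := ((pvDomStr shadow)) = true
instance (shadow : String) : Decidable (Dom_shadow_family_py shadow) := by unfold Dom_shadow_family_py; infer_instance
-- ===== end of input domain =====

-- B replaces A's per-family loop with three startswith checks each by one prefix
-- extraction (up to the first '+', '-' or '_') and a single key lookup; objective: simpler.

-- ===== PORT A =====
def pvFamilies : List String := ["opt", "naive", "pb", "hd", "ad"]

def pvFamLoop (lowered : String) : List String → Option String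
  | [] => none
  | f :: rest =>
    if lowered == f then some f
    else if PySem.Str.startswith lowered (f ++ "+") then some f
    else if PySem.Str.startswith lowered (f ++ "-") then some f
    else if PySem.Str.startswith lowered (f ++ "_") then some f
    else pvFamLoop lowered rest

def shadow_family_py (shadow : String) : Option String :=
  pvFamLoop (PySem.Str.lower shadow) pvFamilies

-- ===== PORT B =====
def pvIsSep (c : Char) : Bool := c == '+' || c == '-' || c == '_'

-- B's for-loop with break cuts at the first separator: candidate = longest separator-free prefix (takeWhile)
def shadow_family_py_alt (shadow : String) : Option String :=
  let lowered := PySem.Str.lower shadow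
  let candidate := String.ofList (lowered.toList.takeWhile (fun c => !pvIsSep c))
  if pvFamilies.contains candidate then some candidate else none

-- ===== PRECONDITION & SPEC =====
def Spec_shadow_family_py (shadow : String) (out : Option String) : Prop := out = shadow_family_py_alt shadow
instance (shadow : String) (out : Option String) : Decidable (Spec_shadow_family_py shadow out) := by unfold Spec_shadow_family_py; infer_instance

-- ===== CLAIM (what is proved, stated in full; the proofs are below) =====
def Claim_equal_shadow_family_py : Prop := ∀ (shadow : String), Dom_shadow_family_py shadow → Spec_shadow_family_py shadow (shadow_family_py shadow)

-- ===== LEMMAS AND PROOFS =====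

set_option maxRecDepth 8192

-- the longest separator-free prefix equals f  ↔  one of A's four checks for family f succeeds
lemma takeWhile_eq_iff (f : List Char) (hf : ∀ c ∈ f, pvIsSep c = false) :
    ∀ cs : List Char, (cs.takeWhile (fun c => !pvIsSep c) = f ↔
      (cs = f ∨ (f ++ ['+']) <+: cs ∨ (f ++ ['-']) <+: cs ∨ (f ++ ['_']) <+: cs)) := by
  induction f with
  | nil =>
    intro cs
    cases cs with
    | nil => simp
    | cons c cs' =>
      by_cases h : pvIsSep c = true
      · simp only [pvIsSep, Bool.or_eq_true, beq_iff_eq] at h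
        rcases h with (hc | hc) | hc <;> subst hc <;>
          simp [List.takeWhile, pvIsSep, List.cons_prefix_cons]
      · simp only [Bool.not_eq_true] at h
        have h' := h
        simp only [pvIsSep, Bool.or_eq_false_iff, beq_eq_false_iff_ne, ne_eq] at h'
        simp [List.takeWhile, h, List.cons_prefix_cons, Ne.symm h'.1.1, Ne.symm h'.1.2,
          Ne.symm h'.2]
  | cons a f' ih =>
    intro cs
    have ha : pvIsSep a = false := hf a (by simp)
    have hf' : ∀ c ∈ f', pvIsSep c = false := fun c hc => hf c (by simp [hc])
    cases cs with
    | nil => simp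
    | cons c cs' =>
      by_cases hca : c = a
      · subst hca
        simp [List.takeWhile, ha, List.cons_prefix_cons, ih hf' cs']
      · by_cases hsep : pvIsSep c = true
        · simp [List.takeWhile, hsep, List.cons_prefix_cons, hca, Ne.symm hca]
        · simp only [Bool.not_eq_true] at hsep
          simp [List.takeWhile, hsep, List.cons_prefix_cons, hca, Ne.symm hca]

lemma ofList_eq_iff (cs : List Char) (f : String) :
    (String.ofList cs = f) ↔ cs = f.toList := by
  rw [← String.toList_inj, String.toList_ofList]

-- one iteration of A's loop, for a separator-free family, decides "prefix = family"
lemma famLoop_step (low : String) (f : String) (hf : ∀ c ∈ f.toList, pvIsSep c = false)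
    (rest : List String) :
    pvFamLoop low (f :: rest) =
      if low.toList.takeWhile (fun c => !pvIsSep c) = f.toList then some f
      else pvFamLoop low rest := by
  have hiff := takeWhile_eq_iff f.toList hf low.toList
  have h1 : (f ++ "+").toList = f.toList ++ ['+'] := by simp
  have h2 : (f ++ "-").toList = f.toList ++ ['-'] := by simp
  have h3 : (f ++ "_").toList = f.toList ++ ['_'] := by simp
  have heq : (low == f) = (low.toList == f.toList) := by
    rw [Bool.eq_iff_iff]; simp [String.toList_inj]
  rw [pvFamLoop, heq]
  by_cases htw : low.toList.takeWhile (fun c => !pvIsSep c) = f.toList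
  · rw [if_pos htw]
    rcases hiff.mp htw with h' | h' | h' | h' <;>
      split_ifs with c1 c2 c3 c4 <;> try rfl
    all_goals exfalso
    all_goals simp only [PySem.Str.startswith_eq, h1, h2, h3, beq_iff_eq,
      PySem.Chars.startswith_iff] at c1 c2 c3 c4
    · exact c1 h'
    · exact c2 h'
    · exact c3 h'
    · exact c4 h'
  · rw [if_neg htw]
    have n1 : (low.toList == f.toList) = false := by
      simp only [beq_eq_false_iff_ne, ne_eq]
      exact fun h => htw (hiff.mpr (Or.inl h))
    have n2 : PySem.Str.startswith low (f ++ "+") = false := by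
      simp only [PySem.Str.startswith_eq, h1]
      exact Bool.eq_false_iff.mpr fun h =>
        htw (hiff.mpr (Or.inr (Or.inl ((PySem.Chars.startswith_iff _ _).mp h))))
    have n3 : PySem.Str.startswith low (f ++ "-") = false := by
      simp only [PySem.Str.startswith_eq, h2]
      exact Bool.eq_false_iff.mpr fun h =>
        htw (hiff.mpr (Or.inr (Or.inr (Or.inl ((PySem.Chars.startswith_iff _ _).mp h)))))
    have n4 : PySem.Str.startswith low (f ++ "_") = false := by
      simp only [PySem.Str.startswith_eq, h3]
      exact Bool.eq_false_iff.mpr fun h =>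
        htw (hiff.mpr (Or.inr (Or.inr (Or.inr ((PySem.Chars.startswith_iff _ _).mp h)))))
    rw [n1, n2, n3, n4]
    simp

-- ===== VERDICT (by name: the statement is the Claim_ definition above) =====
theorem shadow_family_py_spec : Claim_equal_shadow_family_py := by
  intro shadow _
  show shadow_family_py shadow = shadow_family_py_alt shadow
  unfold shadow_family_py shadow_family_py_alt pvFamilies
  rw [famLoop_step _ "opt" (by simp [pvIsSep]), famLoop_step _ "naive" (by simp [pvIsSep]),
    famLoop_step _ "pb" (by simp [pvIsSep]), famLoop_step _ "hd" (by simp [pvIsSep]),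
    famLoop_step _ "ad" (by simp [pvIsSep])]
  simp only [pvFamLoop, List.contains_cons, List.contains_nil, Bool.or_false]
  generalize (PySem.Str.lower shadow).toList.takeWhile (fun c => !pvIsSep c) = tw
  have e1 : ("opt" : String).toList = ['o', 'p', 't'] := by simp
  have e2 : ("naive" : String).toList = ['n', 'a', 'i', 'v', 'e'] := by simp
  have e3 : ("pb" : String).toList = ['p', 'b'] := by simp
  have e4 : ("hd" : String).toList = ['h', 'd'] := by simp
  have e5 : ("ad" : String).toList = ['a', 'd'] := by simp
  rw [e1, e2, e3, e4, e5]
  by_cases h1 : tw = ['o', 'p', 't']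
  · simp [h1, (ofList_eq_iff tw "opt").mpr (by rw [e1]; exact h1)]
  · have n1 : ¬ String.ofList tw = "opt" :=
      fun h => h1 (by rw [← e1]; exact (ofList_eq_iff tw "opt").mp h)
    by_cases h2 : tw = ['n', 'a', 'i', 'v', 'e']
    · simp [h1, h2, n1, (ofList_eq_iff tw "naive").mpr (by rw [e2]; exact h2)]
    · have n2 : ¬ String.ofList tw = "naive" :=
        fun h => h2 (by rw [← e2]; exact (ofList_eq_iff tw "naive").mp h)
      by_cases h3 : tw = ['p', 'b']
      · simp [h1, h2, h3, n1, n2, (ofList_eq_iff tw "pb").mpr (by rw [e3]; exact h3)]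
      · have n3 : ¬ String.ofList tw = "pb" :=
          fun h => h3 (by rw [← e3]; exact (ofList_eq_iff tw "pb").mp h)
        by_cases h4 : tw = ['h', 'd']
        · simp [h1, h2, h3, h4, n1, n2, n3, (ofList_eq_iff tw "hd").mpr (by rw [e4]; exact h4)]
        · have n4 : ¬ String.ofList tw = "hd" :=
            fun h => h4 (by rw [← e4]; exact (ofList_eq_iff tw "hd").mp h)
          by_cases h5 : tw = ['a', 'd']
          · simp [h1, h2, h3, h4, h5, n1, n2, n3, n4,
              (ofList_eq_iff tw "ad").mpr (by rw [e5]; exact h5)]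
          · have n5 : ¬ String.ofList tw = "ad" :=
              fun h => h5 (by rw [← e5]; exact (ofList_eq_iff tw "ad").mp h)
            simp [h1, h2, h3, h4, h5, n1, n2, n3, n4, n5]
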